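-- pv_equiv track=rewrite | github.com/mubtakir/Sigmoid_Prime-Numbers | complex_sigmoid_explorer.py | count_oscillations
-- ===== SOURCE A (Python) =====
-- def count_oscillations(signal):
--     """Ø¹Ø¯ Ø§Ù„ØªØ°Ø¨Ø°Ø¨Ø§Øª ÙÙŠ Ø§Ù„Ø¥Ø´Ø§Ø±Ø©"""
--     if len(signal) < 3:
--         return 0
--
--     oscillations = 0
--     for i in range(1, len(signal) - 1):
--         if (signal[i] > signal[i-1] and signal[i] > signal[i+1]) or \
--            (signal[i] < signal[i-1] and signal[i] < signal[i+1]):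
--             oscillations += 1
--
--     return oscillations
-- ===== SOURCE B (Python) =====
-- def count_oscillations(sig):
--     diffs = [b - a for a, b in zip(sig, sig[1:])]
--     return sum(1 for x, y in zip(diffs, diffs[1:])
--                if (x > 0 and y < 0) or (x < 0 and y > 0))
-- ===== Notes on version B (the rewrite author's own statement) =====
-- stated objective: alternative
-- what changed: Replaces the index loop comparing each sample with both neighbours by a sign-change scan over the list of consecutive differences (an extremum is exactly a strict sign flip between adjacent differences).
import Mathlib
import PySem

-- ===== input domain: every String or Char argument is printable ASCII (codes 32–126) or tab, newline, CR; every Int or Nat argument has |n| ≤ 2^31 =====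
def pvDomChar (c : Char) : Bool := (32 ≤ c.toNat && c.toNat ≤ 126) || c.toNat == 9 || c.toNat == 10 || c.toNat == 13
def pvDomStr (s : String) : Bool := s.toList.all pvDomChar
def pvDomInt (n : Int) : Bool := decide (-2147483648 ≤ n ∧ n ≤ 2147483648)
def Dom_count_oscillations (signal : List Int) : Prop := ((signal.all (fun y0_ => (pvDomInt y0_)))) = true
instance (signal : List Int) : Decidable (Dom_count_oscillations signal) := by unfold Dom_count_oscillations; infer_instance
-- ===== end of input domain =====

-- B counts strict sign flips between consecutive differences instead of comparing each sample with both neighbours (alternative decomposition, same cost).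

-- ===== PORT A =====
def count_oscillations (signal : List Int) : Int :=
  if signal.length < 3 then 0
  else
    (PySem.List.pyRange 1 ((signal.length : Int) - 1) 1).foldl
      (fun oscillations i =>
        if (PySem.List.pyGetD signal i 0 > PySem.List.pyGetD signal (i - 1) 0 ∧
            PySem.List.pyGetD signal i 0 > PySem.List.pyGetD signal (i + 1) 0) ∨
           (PySem.List.pyGetD signal i 0 < PySem.List.pyGetD signal (i - 1) 0 ∧
            PySem.List.pyGetD signal i 0 < PySem.List.pyGetD signal (i + 1) 0)
        then oscillations + 1 else oscillations) 0

-- ===== PORT B =====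
def count_oscillations_alt (signal : List Int) : Int :=
  let diffs := List.zipWith (fun a b => b - a) signal (signal.drop 1)
  ((List.zip diffs (diffs.drop 1)).countP
      (fun p => (p.1 > 0 && p.2 < 0) || (p.1 < 0 && p.2 > 0)) : Int)

-- ===== PRECONDITION & SPEC =====
def Spec_count_oscillations (signal : List Int) (out : Int) : Prop := out = count_oscillations_alt signal
instance (signal : List Int) (out : Int) : Decidable (Spec_count_oscillations signal out) := by unfold Spec_count_oscillations; infer_instance

-- ===== CLAIM (what is proved, stated in full; the proofs are below) =====
def Claim_equal_count_oscillations : Prop := ∀ (signal : List Int), Dom_count_oscillations signal → Spec_count_oscillations signal (count_oscillations signal)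

-- ===== LEMMAS AND PROOFS =====

-- an extremum test on the three samples starting at position k
def pvTriP (s : List Int) (k : Nat) : Bool :=
  (s.getD (k+1) 0 > s.getD k 0 && s.getD (k+1) 0 > s.getD (k+2) 0) ||
  (s.getD (k+1) 0 < s.getD k 0 && s.getD (k+1) 0 < s.getD (k+2) 0)

lemma pvTriP_cons (a : Int) (t : List Int) (k : Nat) :
    pvTriP (a :: t) (k+1) = pvTriP t k := by
  simp [pvTriP]

-- A's count equals the triple-window count over Nat indices
lemma a_eq_tri (s : List Int) (h : ¬ s.length < 3) :
    count_oscillations s = ((List.range (s.length - 2)).countP (pvTriP s) : Int) := by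
  unfold count_oscillations
  rw [if_neg h]
  rw [PySem.List.foldl_ite_add_one]
  have hlen : ((s.length : Int) - 1) - 1 = ((s.length - 2 : Nat) : Int) := by omega
  rw [PySem.List.pyRange_one, hlen, Int.toNat_natCast, List.countP_map]
  rw [zero_add]
  congr 1
  apply List.countP_congr
  intro k hk
  simp only [List.mem_range] at hk
  simp only [Function.comp]
  have e1 : (1 : Int) + (k : Int) = (((k+1 : Nat)) : Int) := by omega
  have e0 : (((k+1 : Nat)) : Int) - 1 = ((k : Nat) : Int) := by push_cast; ring
  have e3 : (((k+1 : Nat)) : Int) + 1 = (((k+2 : Nat)) : Int) := by push_cast; ring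
  simp only [e1, e0, e3, PySem.List.pyGetD_natCast]
  simp [pvTriP]

-- B's count equals the triple-window count over Nat indices, by induction on s
lemma b_cnt_eq (s : List Int) :
    (List.zip (List.zipWith (fun a b => b - a) s (s.drop 1))
        ((List.zipWith (fun a b => b - a) s (s.drop 1)).drop 1)).countP
      (fun p => (p.1 > 0 && p.2 < 0) || (p.1 < 0 && p.2 > 0))
    = (List.range (s.length - 2)).countP (pvTriP s) := by
  induction s with
  | nil => rfl
  | cons a t ih =>
    cases t with
    | nil => rfl
    | cons b u =>
      cases u with
      | nil => rfl
      | cons c v =>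
        have hz : List.zip (List.zipWith (fun x y => y - x) (a :: b :: c :: v) ((a :: b :: c :: v).drop 1))
              ((List.zipWith (fun x y => y - x) (a :: b :: c :: v) ((a :: b :: c :: v).drop 1)).drop 1)
            = (b - a, c - b) :: List.zip (List.zipWith (fun x y => y - x) (b :: c :: v) ((b :: c :: v).drop 1))
                ((List.zipWith (fun x y => y - x) (b :: c :: v) ((b :: c :: v).drop 1)).drop 1) := by
          simp [List.zip]
        rw [hz, List.countP_cons]
        have hr : List.range ((a :: b :: c :: v).length - 2)
            = 0 :: (List.range ((b :: c :: v).length - 2)).map Nat.succ := by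
          have h2 : (a :: b :: c :: v).length - 2 = ((b :: c :: v).length - 2) + 1 := by
            simp only [List.length_cons]; omega
          rw [h2, List.range_succ_eq_map]
        rw [hr, List.countP_cons, List.countP_map]
        have hbody : ((List.range ((b :: c :: v).length - 2)).countP ((pvTriP (a :: b :: c :: v)) ∘ (· + 1)))
            = (List.range ((b :: c :: v).length - 2)).countP (pvTriP (b :: c :: v)) := by
          apply List.countP_congr
          intro k _
          simp only [Function.comp]
          rw [pvTriP_cons]
        have hhead : (((b - a, c - b).1 > 0 && (b - a, c - b).2 < 0) ||
              ((b - a, c - b).1 < 0 && (b - a, c - b).2 > 0)) = pvTriP (a :: b :: c :: v) 0 := by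
          simp [pvTriP]
        rw [hbody, hhead, ih]

lemma b_eq_tri (s : List Int) :
    count_oscillations_alt s = ((List.range (s.length - 2)).countP (pvTriP s) : Int) := by
  show ((List.zip (List.zipWith (fun a b => b - a) s (s.drop 1))
        ((List.zipWith (fun a b => b - a) s (s.drop 1)).drop 1)).countP
      (fun p => (p.1 > 0 && p.2 < 0) || (p.1 < 0 && p.2 > 0)) : Int)
    = ((List.range (s.length - 2)).countP (pvTriP s) : Int)
  exact_mod_cast b_cnt_eq s

-- ===== VERDICT (by name: the statement is the Claim_ definition above) =====
theorem count_oscillations_spec : Claim_equal_count_oscillations := by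
  intro s _
  unfold Spec_count_oscillations
  by_cases h : s.length < 3
  · have hb : count_oscillations_alt s = 0 := by
      rw [b_eq_tri]
      have h2 : s.length - 2 = 0 := by omega
      simp [h2]
    rw [hb]
    unfold count_oscillations
    rw [if_pos h]
  · rw [a_eq_tri s h, b_eq_tri]
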